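-- pv_equiv track=rewrite | github.com/Iam1an/Jumpworx | jwcore/phase_detect.py | _fill_label_gaps
-- ===== SOURCE A (Python) =====
-- from typing import List, Dict, Optional, Tuple
--
-- def _fill_label_gaps(labels: List[str]) -> List[str]:
--     """
--     Fill short 'unknown' gaps by propagating nearest known phase.
--     Also forward-fills over isolated NaN/weak frames.
--
--     Strategy:
--       1) forward-fill
--       2) backward-fill remaining
--     """
--     T = len(labels)
--     out = list(labels)
--
--     # forward-fill
--     last = None
--     for i in range(T):
--         if out[i] not in (None, "", "unknown"):
--             last = out[i]
--         elif last is not None: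
--             out[i] = last
--
--     # backward-fill
--     next_label = None
--     for i in range(T - 1, -1, -1):
--         if out[i] not in (None, "", "unknown"):
--             next_label = out[i]
--         elif next_label is not None:
--             out[i] = next_label
--
--     # If still 'unknown' everywhere, keep as-is (caller interprets fail).
--     return out
-- ===== SOURCE B (Python) =====
-- def _fill_label_gaps(labels):
--     # Single forward pass: buffer leading unknowns, flush them to the first
--     # known label; afterwards every unknown copies the last known label.
--     res = []
--     lead = []
--     last = None
--     for x in labels:
--         if x not in (None, "", "unknown"):
--             if last is None:
--                 res.extend([x] * len(lead))
--                 lead = []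
--             last = x
--             res.append(x)
--         elif last is None:
--             lead.append(x)
--         else:
--             res.append(last)
--     return res + lead if last is None else res
-- ===== Notes on version B (the rewrite author's own statement) =====
-- stated objective: alternative
-- what changed: Replaces A's two index-loop passes (forward-fill, then backward-fill over the whole array) with a single forward pass that buffers leading unknowns and flushes them to the first known label.
import Mathlib
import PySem

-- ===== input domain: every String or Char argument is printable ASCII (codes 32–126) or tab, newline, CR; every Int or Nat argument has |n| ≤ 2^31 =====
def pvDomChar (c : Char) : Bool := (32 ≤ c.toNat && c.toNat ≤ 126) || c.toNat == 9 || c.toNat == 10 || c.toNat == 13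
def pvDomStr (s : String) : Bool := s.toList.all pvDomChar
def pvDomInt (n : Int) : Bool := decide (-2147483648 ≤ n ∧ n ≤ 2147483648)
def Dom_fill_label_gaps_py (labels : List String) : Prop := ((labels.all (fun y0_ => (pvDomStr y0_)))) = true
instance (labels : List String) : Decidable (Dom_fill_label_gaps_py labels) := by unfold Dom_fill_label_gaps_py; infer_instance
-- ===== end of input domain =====

-- B replaces A's forward pass + backward pass with one forward pass that buffers
-- leading unknowns and flushes them to the first known label (alternative decomposition).

-- ===== PORT A =====
-- A's two index loops write only position i while scanning; each is ported as a
-- structural pass carrying `last`, the backward loop as the same pass over the reverse.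
def fillPassA (last : Option String) : List String → List String
  | [] => []
  | x :: xs =>
    if x ≠ "" ∧ x ≠ "unknown" then x :: fillPassA (some x) xs
    else
      match last with
      | some l => l :: fillPassA last xs
      | none => x :: fillPassA none xs

def fill_label_gaps_py (labels : List String) : List String :=
  let out := labels
  -- forward-fill
  let out := fillPassA none out
  -- backward-fill (loop from T-1 down to 0 = same pass over the reversed list)
  let out := (fillPassA none out.reverse).reverse
  out

-- ===== PORT B =====
def altGo : List String → Option String → List String → List String
  | [], last, lead =>
    (match last with
     | none => lead
     | some _ => [])
  | x :: xs, last, lead =>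
    if x ≠ "" ∧ x ≠ "unknown" then
      match last with
      | none => List.replicate lead.length x ++ x :: altGo xs (some x) []
      | some _ => x :: altGo xs (some x) lead
    else
      match last with
      | none => altGo xs none (lead ++ [x])
      | some l => l :: altGo xs last lead

def fill_label_gaps_py_alt (labels : List String) : List String :=
  altGo labels none []

-- ===== PRECONDITION & SPEC =====
def Spec_fill_label_gaps_py (labels : List String) (out : List String) : Prop := out = fill_label_gaps_py_alt labels
instance (labels : List String) (out : List String) : Decidable (Spec_fill_label_gaps_py labels out) := by unfold Spec_fill_label_gaps_py; infer_instance

-- ===== CLAIM (what is proved, stated in full; the proofs are below) =====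
def Claim_equal_fill_label_gaps_py : Prop := ∀ (labels : List String), Dom_fill_label_gaps_py labels → Spec_fill_label_gaps_py labels (fill_label_gaps_py labels)

-- ===== LEMMAS AND PROOFS =====

-- "unknown" predicate shared by both ports' branch conditions
def isU (x : String) : Prop := ¬(x ≠ "" ∧ x ≠ "unknown")

lemma fillA_eq (labels : List String) :
    fill_label_gaps_py labels = (fillPassA none (fillPassA none labels).reverse).reverse := rfl

-- every list is all-unknown or splits at its first known element
lemma decompose (l : List String) :
    (∀ x ∈ l, isU x) ∨ ∃ u k rest, l = u ++ k :: rest ∧ (∀ x ∈ u, isU x) ∧ ¬ isU k := by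
  induction l with
  | nil => exact Or.inl (by simp)
  | cons x xs ih =>
    by_cases hx : isU x
    · rcases ih with h | ⟨u, k, rest, hrw, hu, hk⟩
      · exact Or.inl (by simpa [hx] using h)
      · exact Or.inr ⟨x :: u, k, rest, by simp [hrw], by simpa [hx] using hu, hk⟩
    · exact Or.inr ⟨[], x, xs, by simp, by simp, hx⟩

lemma fillPassA_allU_none (l : List String) (h : ∀ x ∈ l, isU x) :
    fillPassA none l = l := by
  induction l with
  | nil => rfl
  | cons x xs ih =>
    have hx : isU x := h x (by simp)
    have hxs := ih (fun y hy => h y (by simp [hy]))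
    simp only [fillPassA, if_neg hx, hxs]

lemma fillPassA_allU_some (k : String) (l : List String) (h : ∀ x ∈ l, isU x) :
    fillPassA (some k) l = List.replicate l.length k := by
  induction l with
  | nil => rfl
  | cons x xs ih =>
    have hx : isU x := h x (by simp)
    have hxs := ih (fun y hy => h y (by simp [hy]))
    simp only [fillPassA, if_neg hx, hxs, List.length_cons, List.replicate]

lemma fillPassA_allU_prefix (u ys : List String) (h : ∀ x ∈ u, isU x) :
    fillPassA none (u ++ ys) = u ++ fillPassA none ys := by
  induction u with
  | nil => rfl
  | cons x xs ih =>
    have hx : isU x := h x (by simp)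
    have hxs := ih (fun y hy => h y (by simp [hy]))
    simp only [List.cons_append, fillPassA, if_neg hx, hxs]

lemma fillPassA_known (l : String) (xs : List String) (hl : ¬ isU l) :
    ∀ y ∈ fillPassA (some l) xs, ¬ isU y := by
  induction xs generalizing l with
  | nil => simp [fillPassA]
  | cons x xs ih =>
    by_cases hx : isU x
    · simp only [fillPassA, if_neg hx]
      intro y hy
      rcases List.mem_cons.mp hy with hy | hy
      · simpa [hy] using hl
      · exact ih l hl y hy
    · have hx' : x ≠ "" ∧ x ≠ "unknown" := not_not.mp hx
      simp only [fillPassA, if_pos hx']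
      intro y hy
      rcases List.mem_cons.mp hy with hy | hy
      · subst hy; exact hx
      · exact ih x hx y hy

lemma fillPassA_known_prefix (zs : List String) (k : String) (ws : List String)
    (hz : ∀ x ∈ zs, ¬ isU x) (hk : ¬ isU k) :
    ∀ last, fillPassA last (zs ++ k :: ws) = zs ++ k :: fillPassA (some k) ws := by
  induction zs with
  | nil =>
    intro last
    simp only [List.nil_append, fillPassA, if_pos (not_not.mp hk)]
  | cons x xs ih =>
    intro last
    have hx : ¬ isU x := hz x (by simp)
    have hxs := ih (fun y hy => hz y (by simp [hy])) (some x)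
    simp only [List.cons_append, fillPassA, if_pos (not_not.mp hx), hxs]

lemma altGo_allU (xs : List String) (h : ∀ x ∈ xs, isU x) :
    ∀ lead, altGo xs none lead = lead ++ xs := by
  induction xs with
  | nil => intro lead; simp [altGo]
  | cons x xs ih =>
    intro lead
    have hx : isU x := h x (by simp)
    have hxs := ih (fun y hy => h y (by simp [hy])) (lead ++ [x])
    simp only [altGo, if_neg hx, hxs]
    simp

lemma altGo_allU_prefix (u ys : List String) (h : ∀ x ∈ u, isU x) :
    ∀ lead, altGo (u ++ ys) none lead = altGo ys none (lead ++ u) := by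
  induction u with
  | nil => intro lead; simp
  | cons x xs ih =>
    intro lead
    have hx : isU x := h x (by simp)
    have hxs := ih (fun y hy => h y (by simp [hy])) (lead ++ [x])
    simp only [List.cons_append, altGo, if_neg hx, hxs]
    simp

lemma altGo_some (xs : List String) : ∀ l lead, altGo xs (some l) lead = fillPassA (some l) xs := by
  induction xs with
  | nil => intro l lead; rfl
  | cons x xs ih =>
    intro l lead
    by_cases hx : isU x
    · simp only [altGo, fillPassA, if_neg hx, ih]
    · simp only [altGo, fillPassA, if_pos (not_not.mp hx), ih]

-- ===== VERDICT (by name: the statement is the Claim_ definition above) =====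
theorem fill_label_gaps_py_spec : Claim_equal_fill_label_gaps_py := by
  intro labels _
  show fill_label_gaps_py labels = fill_label_gaps_py_alt labels
  rw [fillA_eq]
  unfold fill_label_gaps_py_alt
  rcases decompose labels with h | ⟨u, k, rest, hrw, hu, hk⟩
  · have h1 : fillPassA none labels = labels := fillPassA_allU_none labels h
    have h2 : fillPassA none labels.reverse = labels.reverse :=
      fillPassA_allU_none _ (by intro x hx; exact h x (List.mem_reverse.mp hx))
    simp [h1, h2, altGo_allU labels h []]
  · subst hrw
    have hurev : ∀ x ∈ u.reverse, isU x := by intro x hx; exact hu x (List.mem_reverse.mp hx)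
    have hF := fillPassA_known k rest hk
    have step1 : fillPassA none (u ++ k :: rest) = u ++ k :: fillPassA (some k) rest := by
      rw [fillPassA_allU_prefix u _ hu]
      simp only [fillPassA, if_pos (not_not.mp hk)]
    rw [step1]
    have hrev : (u ++ k :: fillPassA (some k) rest).reverse
        = (fillPassA (some k) rest).reverse ++ k :: u.reverse := by simp
    rw [hrev]
    have hzrev : ∀ x ∈ (fillPassA (some k) rest).reverse, ¬ isU x := by
      intro x hx; exact hF x (List.mem_reverse.mp hx)
    rw [fillPassA_known_prefix _ k _ hzrev hk none]
    rw [fillPassA_allU_some k u.reverse hurev]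
    rw [altGo_allU_prefix u _ hu []]
    have hstep2 : altGo (k :: rest) none ([] ++ u)
        = List.replicate u.length k ++ k :: fillPassA (some k) rest := by
      simp only [List.nil_append, altGo, if_pos (not_not.mp hk), altGo_some]
    rw [hstep2]
    simp
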